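-- pv_equiv track=rewrite | github.com/MrBrantCode/unitest_baseline | mut_generate/mist_train_taco/taco_1159/solution.py | max_different_values
-- ===== SOURCE A (Python) =====
-- def max_different_values(arr: list) -> int:
--     """
--     Calculate the maximum number of different values in the array that can be achieved by negating any subset of the given numbers.
--
--     Parameters:
--     arr (list): A list of integers.
--
--     Returns:
--     int: The maximum number of different values that can be achieved.
--     """
--     unique_values = set()
--     for num in arr:
--         if num in unique_values:
--             unique_values.add(-num)
--         else:
--             unique_values.add(num)
--     return len(unique_values)
-- ===== SOURCE B (Python) =====
-- def max_different_values(arr: list) -> int: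
--     counts = {}
--     for num in arr:
--         key = abs(num)
--         counts[key] = counts.get(key, 0) + 1
--     result = 0
--     for key, cnt in counts.items():
--         result += 1 if (key == 0 or cnt == 1) else 2
--     return result
-- ===== Notes on version B (the rewrite author's own statement) =====
-- stated objective: simpler
-- what changed: Replaces A's order-dependent loop that inserts num or -num into a growing set by a frequency table of absolute values reduced in one pass (key 0 contributes 1, any other absolute value contributes 1 if it occurs once, else 2).
import Mathlib
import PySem

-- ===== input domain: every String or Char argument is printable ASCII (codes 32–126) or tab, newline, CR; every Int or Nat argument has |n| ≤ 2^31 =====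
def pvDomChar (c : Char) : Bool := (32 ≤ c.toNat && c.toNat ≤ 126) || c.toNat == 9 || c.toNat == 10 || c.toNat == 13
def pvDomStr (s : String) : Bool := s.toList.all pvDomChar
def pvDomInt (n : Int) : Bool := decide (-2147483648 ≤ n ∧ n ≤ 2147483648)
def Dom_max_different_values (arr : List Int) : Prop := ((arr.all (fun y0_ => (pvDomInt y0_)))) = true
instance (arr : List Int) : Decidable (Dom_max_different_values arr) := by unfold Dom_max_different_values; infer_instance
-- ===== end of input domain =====

-- B replaces A's order-dependent negate-into-a-set loop by a frequency table of absolute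
-- values reduced in one pass (key 0 contributes 1; any other key contributes 1 if its count
-- is 1, else 2); objective: simpler count-then-reduce formulation, same return value.

-- ===== PORT A =====
def max_different_values (arr : List Int) : Int :=
  PySem.Set.len
    (arr.foldl
      (fun s num => if PySem.Set.contains s num then PySem.Set.add s (-num) else PySem.Set.add s num)
      PySem.Set.empty)

-- ===== PORT B =====
-- B's first loop: the frequency table counts[abs(num)] += 1
def pvCounts (arr : List Int) : PySem.Dict Int Int :=
  arr.foldl (fun d num => d.insert |num| (d.getD |num| 0 + 1)) PySem.Dict.empty

def max_different_values_alt (arr : List Int) : Int :=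
  let counts := pvCounts arr
  counts.items.foldl (fun res kv => res + (if kv.1 = 0 ∨ kv.2 = 1 then 1 else 2)) 0

-- ===== PRECONDITION & SPEC =====
def Spec_max_different_values (arr : List Int) (out : Int) : Prop := out = max_different_values_alt arr
instance (arr : List Int) (out : Int) : Decidable (Spec_max_different_values arr out) := by unfold Spec_max_different_values; infer_instance

-- ===== CLAIM (what is proved, stated in full; the proofs are below) =====
def Claim_equal_max_different_values : Prop := ∀ (arr : List Int), Dom_max_different_values arr → Spec_max_different_values arr (max_different_values arr)

-- ===== LEMMAS AND PROOFS =====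

-- the list of absolute values of l (what B counts)
def pvAbsMap (l : List Int) : List Int := l.map (fun x => |x|)
def pvWgt (l : List Int) (k : Int) : Int :=
  if k = 0 ∨ ((pvAbsMap l).count k : Int) = 1 then 1 else 2
def pvAset (l : List Int) : PySem.Set Int :=
  l.foldl
    (fun s num => if PySem.Set.contains s num then PySem.Set.add s (-num) else PySem.Set.add s num)
    PySem.Set.empty
def pvCh (l : List Int) (x : Int) : Prop :=
  1 ≤ l.count x ∨ (1 ≤ l.count (-x) ∧ 2 ≤ (pvAbsMap l).count |x|)

lemma pvCount_absMap_pos (l : List Int) (a : Int) (ha : 0 < a) :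
    (pvAbsMap l).count a = l.count a + l.count (-a) := by
  induction l with
  | nil => simp [pvAbsMap]
  | cons y t ih =>
    simp only [pvAbsMap, List.map_cons, List.count_cons, beq_iff_eq] at *
    rcases abs_cases y with ⟨hy, hy2⟩ | ⟨hy, hy2⟩ <;> rw [hy] <;>
      split_ifs <;> omega

lemma pvCount_absMap_zero (l : List Int) :
    (pvAbsMap l).count 0 = l.count 0 := by
  induction l with
  | nil => rfl
  | cons y t ih =>
    simp only [pvAbsMap, List.map_cons, List.count_cons, beq_iff_eq, abs_eq_zero] at *
    omega

lemma pvCount_absMap_abs (l : List Int) (x : Int) :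
    (pvAbsMap l).count |x| = if x = 0 then l.count 0 else l.count x + l.count (-x) := by
  split_ifs with h
  · subst h; simpa using pvCount_absMap_zero l
  · rcases lt_or_gt_of_ne h with hx | hx
    · rw [abs_of_neg hx, pvCount_absMap_pos l (-x) (by omega)]
      simp [add_comm]
    · rw [abs_of_pos hx, pvCount_absMap_pos l x hx]

lemma pvAbsEq {y x : Int} (h : |y| = |x|) : y = x ∨ y = -x := by
  rcases abs_cases y with ⟨h1, _⟩ | ⟨h1, _⟩ <;> rcases abs_cases x with ⟨h2, _⟩ | ⟨h2, _⟩ <;> omega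

lemma pvSum_map_update {K : List Int} (hnd : K.Nodup) {a : Int} (ha : a ∈ K)
    (f g : Int → Int) (hfg : ∀ k ∈ K, k ≠ a → f k = g k) :
    (K.map f).sum = (K.map g).sum + (f a - g a) := by
  induction K with
  | nil => cases ha
  | cons k t ih =>
    rcases List.nodup_cons.mp hnd with ⟨hk, hnt⟩
    rcases List.mem_cons.mp ha with rfl | hat
    · have ht : t.map f = t.map g :=
        List.map_congr_left (fun y hy => hfg y (List.mem_cons_of_mem _ hy) (fun h => hk (h ▸ hy)))
      simp [ht]; ring
    · have hfk : f k = g k := hfg k List.mem_cons_self (fun h => hk (h ▸ hat))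
      have := ih hnt hat (fun y hy hya => hfg y (List.mem_cons_of_mem _ hy) hya)
      simp [hfk, this]; ring

set_option maxRecDepth 4000 in
lemma pvMain (l : List Int) :
    (∀ x, x ∈ pvAset l ↔ pvCh l x) ∧
    ((pvAset l).length : Int) = ((PySem.Set.ofList (pvAbsMap l)).map (pvWgt l)).sum := by
  induction l using List.reverseRecOn with
  | nil =>
    refine ⟨fun x => ?_, ?_⟩
    · simp [pvAset, pvCh, pvAbsMap, PySem.Set.empty]
    · simp [pvAset, pvAbsMap, PySem.Set.empty, PySem.Set.ofList]
  | append_singleton l x ih =>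
    obtain ⟨ihm, ihl⟩ := ih
    have hset : pvAset (l ++ [x]) =
        (if PySem.Set.contains (pvAset l) x then (pvAset l).add (-x) else (pvAset l).add x) := by
      simp [pvAset, List.foldl_append]
    have habs : pvAbsMap (l ++ [x]) = pvAbsMap l ++ [|x|] := by simp [pvAbsMap]
    have hK : PySem.Set.ofList (pvAbsMap (l ++ [x])) = (PySem.Set.ofList (pvAbsMap l)).add |x| := by
      rw [habs, PySem.Set.ofList_append_singleton]
    have hcnt : ∀ k : Int, (pvAbsMap (l ++ [x])).count k
        = (pvAbsMap l).count k + (if k = |x| then 1 else 0) := by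
      intro k; rw [habs]
      simp only [List.count_append, List.count_singleton, beq_iff_eq]
      split_ifs <;> omega
    have hcntl : ∀ y : Int, (l ++ [x]).count y = l.count y + (if y = x then 1 else 0) := by
      intro y
      simp only [List.count_append, List.count_singleton, beq_iff_eq]
      split_ifs <;> omega
    have hw : ∀ k, k ≠ |x| → pvWgt (l ++ [x]) k = pvWgt l k := by
      intro k hk; simp [pvWgt, hcnt k, hk]
    -- membership in abs-key set
    have hKmem : |x| ∈ PySem.Set.ofList (pvAbsMap l) ↔ 1 ≤ (pvAbsMap l).count |x| := by
      rw [PySem.Set.mem_ofList]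
      exact ⟨fun h => List.count_pos_iff.mpr h, fun h => List.count_pos_iff.mp (by omega)⟩
    have hmemx : x ∈ pvAset l ↔ pvCh l x := ihm x
    have hmemnx : -x ∈ pvAset l ↔ pvCh l (-x) := ihm (-x)
    have hchx : pvCh l x ↔ (1 ≤ l.count x ∨ (1 ≤ l.count (-x) ∧ 2 ≤ (pvAbsMap l).count |x|)) := Iff.rfl
    have hchnx : pvCh l (-x) ↔ (1 ≤ l.count (-x) ∨ (1 ≤ l.count x ∧ 2 ≤ (pvAbsMap l).count |x|)) := by
      simp [pvCh, abs_neg]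
    have hca := pvCount_absMap_abs l x
    -- the three membership-characterisation goals are proved uniformly at the end;
    -- here we case on the multiplicity of |x| in l
    by_cases hx0 : x = 0
    · -- x = 0 : set gains 0 if fresh, else unchanged; weight of key 0 is always 1
      subst hx0
      simp only [neg_zero, abs_zero] at hcnt hcntl hw hKmem hmemx hmemnx hchx hchnx hset hK
      simp at hca
      by_cases h0 : (1:Nat) ≤ l.count 0
      · -- 0 already present: nothing changes
        have hin : (0:Int) ∈ pvAset l := hmemx.mpr (Or.inl h0)
        have hc : PySem.Set.contains (pvAset l) 0 = true := (PySem.Set.contains_iff _ _).mpr hin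
        have hs' : pvAset (l ++ [0]) = pvAset l := by
          rw [hset, hc, if_pos rfl, PySem.Set.add_of_mem hin]
        have hKeq : PySem.Set.ofList (pvAbsMap (l ++ [0])) = PySem.Set.ofList (pvAbsMap l) := by
          rw [hK]
          exact PySem.Set.add_of_mem (hKmem.mpr (by omega))
        refine ⟨fun y => ?_, ?_⟩
        · rw [hs', ihm y, pvCh, pvCh, hcntl, hcntl, hcnt]
          by_cases hy : |y| = |0| <;> [rcases pvAbsEq hy with rfl | h; skip] <;>
            (simp_all; try omega)
        · rw [hs', hKeq, ihl]
          congr 1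
          refine List.map_congr_left (fun k hk => ?_)
          by_cases hk0 : k = (0:Int)
          · subst hk0; simp only [pvWgt, hcnt 0]
            split_ifs <;> simp_all
          · exact (hw k hk0).symm
      · -- 0 fresh
        have hnin : (0:Int) ∉ pvAset l := by
          rw [hmemx, hchx]; omega
        have hc : PySem.Set.contains (pvAset l) 0 = false := by
          rw [← Bool.not_eq_true, PySem.Set.contains_iff]; exact hnin
        have hs' : pvAset (l ++ [0]) = pvAset l ++ [0] := by
          rw [hset, hc]; simp [PySem.Set.add_of_not_mem hnin]
        have hKnin : (0:Int) ∉ PySem.Set.ofList (pvAbsMap l) := by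
          rw [hKmem]; omega
        have hKeq : PySem.Set.ofList (pvAbsMap (l ++ [0])) = PySem.Set.ofList (pvAbsMap l) ++ [0] := by
          rw [hK, PySem.Set.add_of_not_mem hKnin]
        refine ⟨fun y => ?_, ?_⟩
        · rw [hs'] ; rw [List.mem_append, List.mem_singleton, ihm y, pvCh, pvCh, hcntl, hcntl, hcnt]
          by_cases hy : |y| = |0| <;> [rcases pvAbsEq hy with rfl | h; skip] <;>
            (simp_all; try omega)
        · rw [hs', hKeq]
          have hmapc : (PySem.Set.ofList (pvAbsMap l)).map (pvWgt (l ++ [0]))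
              = (PySem.Set.ofList (pvAbsMap l)).map (pvWgt l) := by
            refine List.map_congr_left (fun k hk => hw k ?_)
            intro hk0; exact hKnin (hk0 ▸ hk)
          simp only [List.map_append, List.sum_append, hmapc, List.length_append]
          have : pvWgt (l ++ [0]) 0 = 1 := by simp [pvWgt]
          simp [this, ihl]
    · -- x ≠ 0
      have hcax : (pvAbsMap l).count |x| = l.count x + l.count (-x) := by
        rw [hca, if_neg hx0]
      have hd : -x ≠ x := by omega
      have hd2 : x ≠ -x := by omega
      by_cases hfresh : l.count x + l.count (-x) = 0
      · -- |x| fresh: set and key list both gain one element of weight 1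
        have hnin : x ∉ pvAset l := by rw [hmemx, hchx]; omega
        have hc : PySem.Set.contains (pvAset l) x = false := by
          rw [← Bool.not_eq_true, PySem.Set.contains_iff]; exact hnin
        have hs' : pvAset (l ++ [x]) = pvAset l ++ [x] := by
          rw [hset, hc]; simp [PySem.Set.add_of_not_mem hnin]
        have hKnin : |x| ∉ PySem.Set.ofList (pvAbsMap l) := by rw [hKmem]; omega
        have hKeq : PySem.Set.ofList (pvAbsMap (l ++ [x])) = PySem.Set.ofList (pvAbsMap l) ++ [|x|] := by
          rw [hK, PySem.Set.add_of_not_mem hKnin]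
        refine ⟨fun y => ?_, ?_⟩
        · rw [hs', List.mem_append, List.mem_singleton, ihm y, pvCh, pvCh, hcntl, hcntl, hcnt]
          by_cases hy : |y| = |x|
          · rcases pvAbsEq hy with h | h
            · subst h
              split_ifs <;> omega
            · subst h
              simp only [abs_neg, neg_neg, or_true, true_iff]
              split_ifs <;> omega
          · have hyx : y ≠ x := fun h => hy (by rw [h])
            have hynx : -y ≠ x := fun h => hy (by rw [← h]; simp)
            simp [hy, hyx, hynx]
        · have hmapc : (PySem.Set.ofList (pvAbsMap l)).map (pvWgt (l ++ [x]))
              = (PySem.Set.ofList (pvAbsMap l)).map (pvWgt l) := by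
            refine List.map_congr_left (fun k hk => hw k ?_)
            intro hk0; exact hKnin (hk0 ▸ hk)
          have hw1 : pvWgt (l ++ [x]) |x| = 1 := by
            simp [pvWgt, hcnt, hcax, hfresh] <;> omega
          rw [hs', hKeq]
          simp only [List.map_append, List.sum_append, hmapc, List.length_append, List.map_cons,
            List.map_nil, List.sum_cons, List.sum_nil, List.length_cons, List.length_nil, hw1]
          push_cast
          omega
      · by_cases hone : l.count x + l.count (-x) = 1
        · -- second occurrence of this absolute value: one of x,-x is in the set, the other joins
          have hwold : pvWgt l |x| = 1 := by simp [pvWgt, hcax, hone]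
          have hwnew : pvWgt (l ++ [x]) |x| = 2 := by
            have h1 : (|x| : Int) ≠ 0 := by simpa [abs_eq_zero] using hx0
            have h2 : ((pvAbsMap (l ++ [x])).count |x|) = 2 := by rw [hcnt]; simp; omega
            unfold pvWgt
            rw [if_neg]
            push_neg
            exact ⟨h1, by rw [h2]; norm_num⟩
          have hKin : |x| ∈ PySem.Set.ofList (pvAbsMap l) := hKmem.mpr (by omega)
          have hKeq : PySem.Set.ofList (pvAbsMap (l ++ [x])) = PySem.Set.ofList (pvAbsMap l) := by
            rw [hK]; exact PySem.Set.add_of_mem hKin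
          have hsum : ((PySem.Set.ofList (pvAbsMap l)).map (pvWgt (l ++ [x]))).sum
              = ((PySem.Set.ofList (pvAbsMap l)).map (pvWgt l)).sum + 1 := by
            rw [pvSum_map_update (PySem.Set.nodup_ofList _) hKin (pvWgt (l ++ [x])) (pvWgt l) (fun k _ hka => hw k hka), hwold, hwnew]
            norm_num
          -- which of x, -x is present
          have hlen' : ∀ e, pvAset (l ++ [x]) = pvAset l ++ [e] →
              ((pvAset (l ++ [x])).length : Int)
                = ((PySem.Set.ofList (pvAbsMap (l ++ [x]))).map (pvWgt (l ++ [x]))).sum := by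
            intro e he
            rw [he, hKeq, hsum]
            simp only [List.length_append, List.length_cons, List.length_nil]
            push_cast
            omega
          by_cases hcx : 1 ≤ l.count x
          · have hin : x ∈ pvAset l := hmemx.mpr (Or.inl hcx)
            have hnin : -x ∉ pvAset l := by rw [hmemnx, hchnx]; omega
            have hc : PySem.Set.contains (pvAset l) x = true := (PySem.Set.contains_iff _ _).mpr hin
            have hs' : pvAset (l ++ [x]) = pvAset l ++ [-x] := by
              rw [hset, hc, if_pos rfl, PySem.Set.add_of_not_mem hnin]
            refine ⟨fun y => ?_, hlen' _ hs'⟩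
            rw [hs', List.mem_append, List.mem_singleton, ihm y, pvCh, pvCh, hcntl, hcntl, hcnt]
            by_cases hy : |y| = |x|
            · rcases pvAbsEq hy with h | h
              · subst h
                split_ifs <;> omega
              · subst h
                simp only [abs_neg, neg_neg, or_true, true_iff]
                split_ifs <;> omega
            · have hyx : y ≠ x := fun h => hy (by rw [h])
              have hynx : -y ≠ x := fun h => hy (by rw [← h]; simp)
              have hynx2 : y ≠ -x := fun h => hynx (by rw [h]; simp)
              simp [hy, hyx, hynx, hynx2]
          · have hcnx : 1 ≤ l.count (-x) := by omega
            have hnin : x ∉ pvAset l := by rw [hmemx, hchx]; omega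
            have hc : PySem.Set.contains (pvAset l) x = false := by
              rw [← Bool.not_eq_true, PySem.Set.contains_iff]; exact hnin
            have hs' : pvAset (l ++ [x]) = pvAset l ++ [x] := by
              rw [hset, hc]; simp [PySem.Set.add_of_not_mem hnin]
            refine ⟨fun y => ?_, hlen' _ hs'⟩
            rw [hs', List.mem_append, List.mem_singleton, ihm y, pvCh, pvCh, hcntl, hcntl, hcnt]
            by_cases hy : |y| = |x|
            · rcases pvAbsEq hy with h | h
              · subst h
                split_ifs <;> omega
              · subst h
                simp only [abs_neg, neg_neg, or_true, true_iff]
                split_ifs <;> omega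
            · have hyx : y ≠ x := fun h => hy (by rw [h])
              have hynx : -y ≠ x := fun h => hy (by rw [← h]; simp)
              simp [hy, hyx, hynx]
        · -- |x| already has both signs covered: nothing changes
          have h2 : 2 ≤ l.count x + l.count (-x) := by omega
          have hinx : x ∈ pvAset l := by
            rw [hmemx, hchx]; omega
          have hinnx : -x ∈ pvAset l := by
            rw [hmemnx, hchnx]; omega
          have hc : PySem.Set.contains (pvAset l) x = true := (PySem.Set.contains_iff _ _).mpr hinx
          have hs' : pvAset (l ++ [x]) = pvAset l := by
            rw [hset, hc, if_pos rfl, PySem.Set.add_of_mem hinnx]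
          have hKin : |x| ∈ PySem.Set.ofList (pvAbsMap l) := hKmem.mpr (by omega)
          have hKeq : PySem.Set.ofList (pvAbsMap (l ++ [x])) = PySem.Set.ofList (pvAbsMap l) := by
            rw [hK]; exact PySem.Set.add_of_mem hKin
          have hmapc : (PySem.Set.ofList (pvAbsMap l)).map (pvWgt (l ++ [x]))
              = (PySem.Set.ofList (pvAbsMap l)).map (pvWgt l) := by
            refine List.map_congr_left (fun k hk => ?_)
            by_cases hka : k = |x|
            · have h1 : k ≠ 0 := by rw [hka]; simpa [abs_eq_zero] using hx0
              have hnew : (pvAbsMap (l ++ [x])).count k = l.count x + l.count (-x) + 1 := by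
                rw [hka, hcnt, hcax]; simp
              have e1 : pvWgt (l ++ [x]) k = 2 := by
                unfold pvWgt
                rw [if_neg]
                push_neg
                exact ⟨h1, by rw [hnew]; push_cast; omega⟩
              have e2 : pvWgt l k = 2 := by
                unfold pvWgt
                rw [if_neg]
                push_neg
                refine ⟨h1, ?_⟩
                rw [hka, hcax]; push_cast; omega
              rw [e1, e2]
            · exact hw k hka
          refine ⟨fun y => ?_, by rw [hs', hKeq, hmapc, ihl]⟩
          rw [hs', ihm y, pvCh, pvCh, hcntl, hcntl, hcnt]
          by_cases hy : |y| = |x|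
          · rcases pvAbsEq hy with h | h
            · subst h
              split_ifs <;> omega
            · subst h
              simp only [abs_neg, neg_neg, or_true, true_iff]
              split_ifs <;> omega
          · have hyx : y ≠ x := fun h => hy (by rw [h])
            have hynx : -y ≠ x := fun h => hy (by rw [← h]; simp)
            simp [hy, hyx, hynx]

theorem pvSpecAux (arr : List Int) :
    max_different_values arr = max_different_values_alt arr := by
  have hB : pvCounts arr = PySem.Dict.counter (pvAbsMap arr) := by
    unfold pvCounts
    rw [← PySem.Dict.foldl_insert_getD_add_one_eq_counter (pvAbsMap arr), pvAbsMap, List.foldl_map]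
  have hfun : ((fun kv : Int × Int => if kv.1 = 0 ∨ kv.2 = 1 then (1 : Int) else 2) ∘
      (fun k => (k, ((pvAbsMap arr).count k : Int)))) = pvWgt arr := by
    funext k; simp [pvWgt, Function.comp]
  show (pvAset arr).len
    = (pvCounts arr).items.foldl (fun res kv => res + (if kv.1 = 0 ∨ kv.2 = 1 then 1 else 2)) 0
  rw [hB, PySem.Dict.items_counter, PySem.List.foldl_add, List.map_map, hfun, ← (pvMain arr).2]
  simp [PySem.Set.len]

-- ===== VERDICT (by name: the statement is the Claim_ definition above) =====
theorem max_different_values_spec : Claim_equal_max_different_values := by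
  intro arr _
  unfold Spec_max_different_values
  exact pvSpecAux arr
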